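-- pv_equiv track=rewrite | github.com/maxnelso/algorithms_competitions | top_coder/SRM 682/DNASequence.py | longestDNASequence
-- ===== SOURCE A (Python) =====
-- def longestDNASequence(sequence):
--   best_count = 0
--   count = 0
--   for c in sequence:
--     if c == "A" or c == "C" or c == "T" or c == "G":
--       count += 1
--     else:
--       count = 0
--     best_count = max(count, best_count)
--   return best_count
-- ===== SOURCE B (Python) =====
-- def longestDNASequence(sequence):
--     best = 0
--     i = 0
--     n = len(sequence)
--     while i < n:
--         if sequence[i] in "ACTG":
--             j = i
--             while j < n and sequence[j] in "ACTG":
--                 j += 1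
--             if j - i > best:
--                 best = j - i
--             i = j
--         else:
--             i += 1
--     return best
-- ===== Notes on version B (the rewrite author's own statement) =====
-- stated objective: alternative
-- what changed: B scans the string run-by-run: it finds each maximal block of DNA letters with an inner scan and keeps the longest block length, instead of A's per-character rolling counter reset on every non-DNA character.
import Mathlib
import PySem

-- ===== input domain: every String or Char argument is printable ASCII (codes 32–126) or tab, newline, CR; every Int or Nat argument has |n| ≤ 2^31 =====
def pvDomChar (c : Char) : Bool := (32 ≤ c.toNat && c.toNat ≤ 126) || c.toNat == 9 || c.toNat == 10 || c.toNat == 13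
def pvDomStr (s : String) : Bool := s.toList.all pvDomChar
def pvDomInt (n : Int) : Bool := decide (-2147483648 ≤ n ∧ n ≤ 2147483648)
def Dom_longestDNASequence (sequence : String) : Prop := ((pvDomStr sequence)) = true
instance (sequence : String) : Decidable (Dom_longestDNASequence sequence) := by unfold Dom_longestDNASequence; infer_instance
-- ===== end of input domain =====

-- B scans run-by-run (longest maximal DNA block) instead of A's rolling reset counter; alternative decomposition, same cost.

-- ===== PORT A =====
-- rolling counter: count of current streak, best seen so far
def longestDNASequence (sequence : String) : Int :=
  (sequence.toList.foldl
    (fun (p : Int × Int) c =>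
      let count : Int := if c = 'A' ∨ c = 'C' ∨ c = 'T' ∨ c = 'G' then p.2 + 1 else 0
      (max count p.1, count))
    (0, 0)).1

-- ===== PORT B =====
-- c in "ACTG"
def dnaB (c : Char) : Bool := c == 'A' || c == 'C' || c == 'T' || c == 'G'

-- outer scan: at a DNA letter, the inner scan (takeWhile) measures the maximal run, then we jump past it (dropWhile)
def altGo (l : List Char) : Int :=
  match l with
  | [] => 0
  | c :: t =>
    if dnaB c then
      max (1 + ((t.takeWhile dnaB).length : Int)) (altGo (t.dropWhile dnaB))
    else altGo t
termination_by l.length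
decreasing_by
  · exact Nat.lt_succ_of_le (List.length_dropWhile_le dnaB t)
  · exact Nat.lt_succ_self _

def longestDNASequence_alt (sequence : String) : Int := altGo sequence.toList

-- ===== PRECONDITION & SPEC =====
def Spec_longestDNASequence (sequence : String) (out : Int) : Prop := out = longestDNASequence_alt sequence
instance (sequence : String) (out : Int) : Decidable (Spec_longestDNASequence sequence out) := by unfold Spec_longestDNASequence; infer_instance

-- ===== CLAIM (what is proved, stated in full; the proofs are below) =====
def Claim_equal_longestDNASequence : Prop := ∀ (sequence : String), Dom_longestDNASequence sequence → Spec_longestDNASequence sequence (longestDNASequence sequence)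

-- ===== LEMMAS AND PROOFS =====

theorem altGo_nil : altGo [] = 0 := by rw [altGo]

theorem altGo_cons_pos (c : Char) (t : List Char) (h : dnaB c = true) :
    altGo (c :: t) = max (1 + ((t.takeWhile dnaB).length : Int)) (altGo (t.dropWhile dnaB)) := by
  rw [altGo]; simp [h]

theorem altGo_cons_neg (c : Char) (t : List Char) (h : ¬ dnaB c = true) :
    altGo (c :: t) = altGo t := by
  rw [altGo]; simp [h]

theorem altGo_nonneg (l : List Char) : 0 ≤ altGo l := by
  fun_induction altGo l with
  | case1 => omega
  | case2 c t h ih =>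
      have : (0:Int) ≤ ((t.takeWhile dnaB).length : Int) := by positivity
      omega
  | case3 c t h ih => exact ih

-- altGo l = (leading DNA run length) ⊔ altGo (rest)
theorem altGo_split (l : List Char) :
    altGo l = max ((l.takeWhile dnaB).length : Int) (altGo (l.dropWhile dnaB)) := by
  cases l with
  | nil => simp [altGo_nil]
  | cons c t =>
    by_cases h : dnaB c = true
    · rw [altGo_cons_pos c t h]
      simp only [List.takeWhile, List.dropWhile, h, List.length_cons]
      push_cast
      omega
    · rw [altGo_cons_neg c t h]
      simp only [Bool.not_eq_true] at h
      simp only [List.takeWhile, List.dropWhile, h, List.length_nil]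
      rw [altGo_cons_neg c t (by simp [h])]
      have := altGo_nonneg t
      omega

theorem dna_iff (c : Char) : (c = 'A' ∨ c = 'C' ∨ c = 'T' ∨ c = 'G') ↔ dnaB c = true := by
  simp [dnaB]; tauto

-- A's step function, with its condition rephrased through dnaB
theorem stepfun_eq :
    (fun (p : Int × Int) c =>
      let count : Int := if c = 'A' ∨ c = 'C' ∨ c = 'T' ∨ c = 'G' then p.2 + 1 else 0
      (max count p.1, count))
    = (fun (p : Int × Int) c =>
      let count : Int := if dnaB c then p.2 + 1 else 0
      (max count p.1, count)) := by
  funext p c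
  by_cases h : dnaB c = true
  · simp [h, (dna_iff c).mpr h]
  · simp only [Bool.not_eq_true] at h
    simp [h, (dna_iff c)]

-- invariant for the fold, with the carried streak `count` prepended to the head run
theorem fold_eq (l : List Char) : ∀ (best count : Int), 0 ≤ count → count ≤ best →
    (l.foldl
      (fun (p : Int × Int) c =>
        let count : Int := if dnaB c then p.2 + 1 else 0
        (max count p.1, count))
      (best, count)).1
    = max best (max (count + ((l.takeWhile dnaB).length : Int)) (altGo (l.dropWhile dnaB))) := by
  induction l with
  | nil =>
    intro best count h0 hb
    simp [altGo_nil]; omega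
  | cons c t ih =>
    intro best count h0 hb
    by_cases h : dnaB c = true
    · rw [List.foldl_cons]
      simp only [h, if_true]
      rw [ih (max (count + 1) best) (count + 1) (by omega) (by omega)]
      have hs := altGo_split t
      have h1 : (0:Int) ≤ ((t.takeWhile dnaB).length : Int) := by positivity
      have h2 := altGo_nonneg (t.dropWhile dnaB)
      simp only [List.takeWhile, List.dropWhile, h, List.length_cons]
      push_cast
      omega
    · rw [List.foldl_cons]
      simp only [Bool.not_eq_true] at h
      simp only [h, Bool.false_eq_true, if_false]
      rw [ih (max 0 best) 0 le_rfl (by omega)]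
      have hs := altGo_split t
      have h1 : (0:Int) ≤ ((t.takeWhile dnaB).length : Int) := by positivity
      have h2 := altGo_nonneg (t.dropWhile dnaB)
      have h3 := altGo_nonneg t
      simp only [List.takeWhile, List.dropWhile, h, List.length_nil]
      rw [altGo_cons_neg c t (by simp [h])]
      omega

-- ===== VERDICT (by name: the statement is the Claim_ definition above) =====
theorem longestDNASequence_spec : Claim_equal_longestDNASequence := by
  intro s _
  unfold Spec_longestDNASequence longestDNASequence longestDNASequence_alt
  rw [stepfun_eq, fold_eq _ 0 0 le_rfl le_rfl]
  have hs := altGo_split s.toList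
  have h1 : (0:Int) ≤ ((s.toList.takeWhile dnaB).length : Int) := by positivity
  have h2 := altGo_nonneg (s.toList.dropWhile dnaB)
  have h3 := altGo_nonneg s.toList
  omega
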